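-- pv_equiv track=rewrite | github.com/MagOrl/ToutMesProj | INNIT_PROJ/TP/TP10/ecosysteme/ecosysteme.py | en_voie_disparition
-- ===== SOURCE A (Python) =====
-- def en_voie_disparition(ecosysteme, animal):
--     """
--     renvoie True si animal s'éteint est voué à disparaitre à long terme
--     """
--     var = animal
--     cpt = 0
--     try:
--         while ecosysteme[var] is not None :
--             cpt += 1
--             if var in ecosysteme:
--                 var = ecosysteme[var]
--             else:
--                 return False
--             if cpt > len(ecosysteme):
--                 return False
--         return False
--     except:
--         return True
-- ===== SOURCE B (Python) =====
-- def en_voie_disparition(ecosysteme, animal):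
--     """
--     renvoie True si animal s'éteint est voué à disparaitre à long terme
--     """
--     var = animal
--     visited = set()
--     try:
--         while ecosysteme[var] is not None:
--             visited.add(var)
--             var = ecosysteme[var]
--             if var in visited:
--                 return False
--         return False
--     except:
--         return True
-- ===== Notes on version B (the rewrite author's own statement) =====
-- stated objective: idiomatic
-- what changed: Cycle detection by a visited set (structural: stop as soon as the chain revisits a node) instead of A's step counter compared against len(ecosysteme).
import Mathlib
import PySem

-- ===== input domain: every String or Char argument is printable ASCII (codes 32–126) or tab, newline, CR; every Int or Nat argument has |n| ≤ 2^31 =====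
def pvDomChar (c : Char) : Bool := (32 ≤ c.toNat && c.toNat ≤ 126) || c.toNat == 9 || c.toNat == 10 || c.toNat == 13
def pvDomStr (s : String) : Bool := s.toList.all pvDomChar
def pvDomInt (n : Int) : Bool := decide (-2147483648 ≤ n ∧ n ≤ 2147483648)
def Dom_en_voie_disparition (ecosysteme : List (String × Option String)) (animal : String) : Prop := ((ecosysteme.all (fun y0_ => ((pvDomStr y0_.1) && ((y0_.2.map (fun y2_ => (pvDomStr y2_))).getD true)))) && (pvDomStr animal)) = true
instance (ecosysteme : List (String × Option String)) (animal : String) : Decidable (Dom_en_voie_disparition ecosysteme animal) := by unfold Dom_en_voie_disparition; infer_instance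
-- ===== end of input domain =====

-- B replaces A's step counter (bounded by len(ecosysteme)) with a visited set that stops
-- as soon as the chain revisits a node (structural cycle detection); same return value everywhere.

-- ===== PORT A =====
-- A's while loop: var walks the chain; cpt counts steps, cpt > len(ecosysteme) → False;
-- ecosysteme[var] on a missing key raises KeyError, caught by the bare except → True.
-- Recursion is on the counter: it only recurses while cpt + 1 ≤ ecosysteme.length.
def evdLoopA (ecosysteme : List (String × Option String)) (var : String) (cpt : Nat) : Bool :=
  match List.lookup var ecosysteme with
  | none => true                       -- KeyError in the while condition → except → True
  | some none => false                 -- ecosysteme[var] is None → exit loop → False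
  | some (some nxt) =>
      -- cpt += 1 ; if var in ecosysteme: var = ecosysteme[var] else: return False
      if ecosysteme.any (fun p => p.1 == var) then
        if cpt + 1 > ecosysteme.length then false
        else evdLoopA ecosysteme nxt (cpt + 1)
      else false
termination_by ecosysteme.length + 1 - cpt
decreasing_by omega

def en_voie_disparition (ecosysteme : List (String × Option String)) (animal : String) : Bool :=
  evdLoopA ecosysteme animal 0

-- ===== PORT B =====
-- B's while loop with the visited set; the fuel parameter only makes the recursion total:
-- it is ecosysteme.length + 1 at the start and is proved never to reach 0 (the visited set,
-- kept duplicate-free, cannot outgrow the key list).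
def evdLoopB (ecosysteme : List (String × Option String)) (var : String)
    (visited : PySem.Set String) : Nat → Bool
  | 0 => false
  | fuel + 1 =>
    match List.lookup var ecosysteme with
    | none => true                     -- KeyError → except → True
    | some none => false               -- ecosysteme[var] is None → exit loop → False
    | some (some v) =>
        let visited' := PySem.Set.add visited var    -- visited.add(var)
        if PySem.Set.contains visited' v then false  -- if var in visited: return False
        else evdLoopB ecosysteme v visited' fuel

def en_voie_disparition_alt (ecosysteme : List (String × Option String)) (animal : String) : Bool :=
  evdLoopB ecosysteme animal PySem.Set.empty (ecosysteme.length + 1)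

-- ===== PRECONDITION & SPEC =====
def Spec_en_voie_disparition (ecosysteme : List (String × Option String)) (animal : String) (out : Bool) : Prop := out = en_voie_disparition_alt ecosysteme animal
instance (ecosysteme : List (String × Option String)) (animal : String) (out : Bool) : Decidable (Spec_en_voie_disparition ecosysteme animal out) := by unfold Spec_en_voie_disparition; infer_instance

-- ===== CLAIM (what is proved, stated in full; the proofs are below) =====
def Claim_equal_en_voie_disparition : Prop := ∀ (ecosysteme : List (String × Option String)) (animal : String), Dom_en_voie_disparition ecosysteme animal → Spec_en_voie_disparition ecosysteme animal (en_voie_disparition ecosysteme animal)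

-- ===== LEMMAS AND PROOFS =====

-- Reference semantics used only in the proofs: the chain walk with explicit fuel.
-- some true = a key is missing (A/B return True); some false = a None value is reached;
-- none = fuel exhausted while still stepping.
def evdWalk (ecosysteme : List (String × Option String)) : Nat → String → Option Bool
  | fuel, var =>
    match List.lookup var ecosysteme with
    | none => some true
    | some none => some false
    | some (some v) =>
      match fuel with
      | 0 => none
      | f + 1 => evdWalk ecosysteme f v

theorem evd_lookup_mem_keys {ecosysteme : List (String × Option String)} {k : String}
    {b : Option String} (h : List.lookup k ecosysteme = some b) :
    k ∈ ecosysteme.map Prod.fst := by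
  induction ecosysteme with
  | nil => simp [List.lookup] at h
  | cons p rest ih =>
    rw [List.lookup] at h
    by_cases hk : k == p.1
    · simp at hk; simp [hk]
    · simp [hk] at h
      simp [ih h]

theorem evd_lookup_any {ecosysteme : List (String × Option String)} {k : String}
    {b : Option String} (h : List.lookup k ecosysteme = some b) :
    ecosysteme.any (fun p => p.1 == k) = true := by
  have hm := evd_lookup_mem_keys h
  simp only [List.any_eq_true, beq_iff_eq]
  simp only [List.mem_map] at hm
  obtain ⟨p, hp, hpk⟩ := hm
  exact ⟨p, hp, hpk⟩

-- If a set C of nodes is closed under the step function (every node of C maps to a node of C),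
-- the walk from inside C never terminates, whatever the fuel.
theorem evdWalk_cycle (ecosysteme : List (String × Option String)) (C : List String)
    (hC : ∀ w ∈ C, ∃ u, List.lookup w ecosysteme = some (some u) ∧ u ∈ C) :
    ∀ (m : Nat) (var : String), var ∈ C → evdWalk ecosysteme m var = none := by
  intro m
  induction m with
  | zero =>
    intro var hv
    obtain ⟨u, hlk, _⟩ := hC var hv
    rw [evdWalk, hlk]
  | succ f ih =>
    intro var hv
    obtain ⟨u, hlk, hu⟩ := hC var hv
    rw [evdWalk, hlk]
    exact ih u hu

-- A's loop computes the walk with fuel len - cpt (cutting to False when the fuel runs out).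
theorem evdLoopA_eq (ecosysteme : List (String × Option String)) :
    ∀ (n cpt : Nat) (var : String), cpt ≤ ecosysteme.length →
      ecosysteme.length - cpt = n →
      evdLoopA ecosysteme var cpt = ((evdWalk ecosysteme n var).getD false) := by
  intro n
  induction n with
  | zero =>
    intro cpt var hle hn
    have hc : cpt = ecosysteme.length := by omega
    rw [evdLoopA, evdWalk]
    cases hlk : List.lookup var ecosysteme with
    | none => rfl
    | some b =>
      cases b with
      | none => rfl
      | some v =>
        rw [evd_lookup_any hlk]
        simp only [if_true]
        rw [if_pos (by omega)]
        rfl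
  | succ m ih =>
    intro cpt var hle hn
    rw [evdLoopA, evdWalk]
    cases hlk : List.lookup var ecosysteme with
    | none => rfl
    | some b =>
      cases b with
      | none => rfl
      | some v =>
        rw [evd_lookup_any hlk]
        simp only [if_true]
        rw [if_neg (by omega)]
        exact ih (cpt + 1) v (by omega) (by omega)

-- B's loop computes the same walk: the visited set records a duplicate-free chain of keys
-- leading to var, so a revisit witnesses a step-closed set (a cycle) and fuel cannot run out.
theorem evdLoopB_eq (ecosysteme : List (String × Option String)) :
    ∀ (fuel : Nat) (visited : List String) (var : String),
      visited.Nodup →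
      (∀ w ∈ visited, ∃ u, List.lookup w ecosysteme = some (some u) ∧ (u ∈ visited ∨ u = var)) →
      var ∉ visited →
      (∀ w ∈ visited, w ∈ ecosysteme.map Prod.fst) →
      fuel + visited.length = ecosysteme.length + 1 →
      evdLoopB ecosysteme var visited fuel = ((evdWalk ecosysteme (fuel - 1) var).getD false) := by
  intro fuel
  induction fuel with
  | zero =>
    intro visited var hnd _ _ hsub hfl
    exfalso
    have : visited.length ≤ (ecosysteme.map Prod.fst).length :=
      List.Subperm.length_le (List.Nodup.subperm hnd (fun x hx => hsub x hx))
    simp only [List.length_map] at this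
    omega
  | succ f ih =>
    intro visited var hnd hchain hvar hsub hfl
    rw [evdLoopB, evdWalk]
    cases hlk : List.lookup var ecosysteme with
    | none => rfl
    | some b =>
      cases b with
      | none => rfl
      | some v =>
        have hadd : PySem.Set.add visited var = visited ++ [var] :=
          PySem.Set.add_of_not_mem hvar
        have hvk : var ∈ ecosysteme.map Prod.fst := evd_lookup_mem_keys hlk
        have hnd' : (visited ++ [var]).Nodup := by
          simp [List.nodup_append, hnd]
          intro a ha h
          exact hvar (h ▸ ha)
        have hsub' : ∀ w ∈ visited ++ [var], w ∈ ecosysteme.map Prod.fst := by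
          intro w hw
          rcases List.mem_append.mp hw with h | h
          · exact hsub w h
          · simp at h; subst h; exact hvk
        have hlen' : (visited ++ [var]).length ≤ ecosysteme.length := by
          have : (visited ++ [var]).length ≤ (ecosysteme.map Prod.fst).length :=
            List.Subperm.length_le (List.Nodup.subperm hnd' (fun x hx => hsub' x hx))
          simpa using this
        have hf1 : 1 ≤ f := by simp at hlen'; omega
        obtain ⟨f', hf'⟩ : ∃ f', f = f' + 1 := ⟨f - 1, by omega⟩
        subst hf'
        -- the closure property of visited ++ [var]
        have hclosed : ∀ w ∈ visited ++ [var],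
            ∃ u, List.lookup w ecosysteme = some (some u) ∧ (u ∈ visited ++ [var] ∨ u = v) := by
          intro w hw
          rcases List.mem_append.mp hw with h | h
          · obtain ⟨u, hu1, hu2⟩ := hchain w h
            refine ⟨u, hu1, Or.inl ?_⟩
            rcases hu2 with h2 | h2
            · exact List.mem_append.mpr (Or.inl h2)
            · subst h2; simp
          · simp at h; subst h
            exact ⟨v, hlk, Or.inr rfl⟩
        rw [hadd]
        show (if PySem.Set.contains (visited ++ [var]) v = true then false
              else evdLoopB ecosysteme v (visited ++ [var]) (f' + 1))
             = ((evdWalk ecosysteme f' v).getD false)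
        by_cases hmem : v ∈ visited ++ [var]
        · rw [if_pos ((PySem.Set.contains_iff _ _).mpr hmem)]
          -- revisit: visited ++ [var] is step-closed, the walk from v never terminates
          have hcyc : ∀ w ∈ visited ++ [var],
              ∃ u, List.lookup w ecosysteme = some (some u) ∧ u ∈ visited ++ [var] := by
            intro w hw
            obtain ⟨u, hu1, hu2⟩ := hclosed w hw
            refine ⟨u, hu1, ?_⟩
            rcases hu2 with h2 | h2
            · exact h2
            · subst h2; exact hmem
          rw [evdWalk_cycle ecosysteme (visited ++ [var]) hcyc f' v hmem]
          rfl
        · rw [if_neg (fun hc => hmem ((PySem.Set.contains_iff _ _).mp hc))]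
          have hrec := ih (visited ++ [var]) v hnd' hclosed hmem hsub' (by simp at hfl ⊢; omega)
          rw [hrec]
          rfl

-- ===== VERDICT (by name: the statement is the Claim_ definition above) =====
theorem en_voie_disparition_spec : Claim_equal_en_voie_disparition := by
  intro ecosysteme animal _
  unfold Spec_en_voie_disparition en_voie_disparition en_voie_disparition_alt
  rw [evdLoopA_eq ecosysteme (ecosysteme.length - 0) 0 animal (by omega) rfl]
  rw [evdLoopB_eq ecosysteme (ecosysteme.length + 1) PySem.Set.empty animal
        List.nodup_nil (by simp [PySem.Set.empty]) (by simp [PySem.Set.empty])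
        (by simp [PySem.Set.empty]) (by simp [PySem.Set.empty])]
  simp
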